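-- pv_equiv track=rewrite | github.com/maniacmansion12/module_0 | 1.py | game_core_v3
-- ===== SOURCE A (Python) =====
-- def game_core_v3(number):
--
--     count = 1
--     predict = 50
--
--     if predict < number:
--         predict += 25
--     else:
--         predict -= 25
--     if predict < number:
--         predict += 12
--     else:
--         predict -= 12
--     if predict < number:
--         predict += 6
--     else:
--         predict -= 6
--     if predict < number:
--         predict += 3
--     else:
--         predict -= 3
--
--     while number != predict:
--         count += 1
--         if number > predict:
--             predict += 1
--         elif number < predict:
--             predict -= 1
--     return(count)  # выход из цикла, если угадали
-- ===== SOURCE B (Python) =====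
-- def game_core_v3(number):
--     predict = 50
--     for step in (25, 12, 6, 3):
--         predict += step if predict < number else -step
--     return 1 + abs(number - predict)
-- ===== Notes on version B (the rewrite author's own statement) =====
-- stated objective: faster
-- what changed: Replaced the +/-1 while loop with a closed form: fold the four fixed binary-search steps over predict, then return 1 + abs(number - predict).
import Mathlib
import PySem

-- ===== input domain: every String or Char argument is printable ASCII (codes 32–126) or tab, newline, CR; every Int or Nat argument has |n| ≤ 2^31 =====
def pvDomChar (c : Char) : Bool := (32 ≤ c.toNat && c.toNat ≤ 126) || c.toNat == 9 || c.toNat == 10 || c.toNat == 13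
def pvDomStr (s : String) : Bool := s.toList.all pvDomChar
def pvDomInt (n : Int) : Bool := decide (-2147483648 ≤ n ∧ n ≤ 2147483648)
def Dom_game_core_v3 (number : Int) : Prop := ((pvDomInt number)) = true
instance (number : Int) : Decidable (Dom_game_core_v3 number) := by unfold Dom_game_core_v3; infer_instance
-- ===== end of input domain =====

-- B replaces A's ±1 while loop by the closed form 1 + |number - predict| after the four fixed steps (O(1) instead of O(|number - predict|)).

-- ===== PORT A =====
-- the while loop of A: each iteration increments count and moves predict one step towards number
def gameLoopA (number predict count : Int) : Int :=
  if number = predict then count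
  else if number > predict then gameLoopA number (predict + 1) (count + 1)
  else gameLoopA number (predict - 1) (count + 1)
termination_by (number - predict).natAbs
decreasing_by
  · omega
  · omega

def game_core_v3 (number : Int) : Int :=
  let count : Int := 1
  let predict : Int := 50
  let predict := if predict < number then predict + 25 else predict - 25
  let predict := if predict < number then predict + 12 else predict - 12
  let predict := if predict < number then predict + 6 else predict - 6
  let predict := if predict < number then predict + 3 else predict - 3
  gameLoopA number predict count

-- ===== PORT B =====
def game_core_v3_alt (number : Int) : Int :=
  let predict := [25, 12, 6, 3].foldl
    (fun p s => p + (if p < number then s else -s)) (50 : Int)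
  1 + |number - predict|

-- ===== PRECONDITION & SPEC =====
def Spec_game_core_v3 (number : Int) (out : Int) : Prop := out = game_core_v3_alt number
instance (number : Int) (out : Int) : Decidable (Spec_game_core_v3 number out) := by unfold Spec_game_core_v3; infer_instance

-- ===== CLAIM (what is proved, stated in full; the proofs are below) =====
def Claim_equal_game_core_v3 : Prop := ∀ (number : Int), Dom_game_core_v3 number → Spec_game_core_v3 number (game_core_v3 number)

-- ===== LEMMAS AND PROOFS =====
theorem gameLoopA_eq (number predict count : Int) :
    gameLoopA number predict count = count + |number - predict| := by
  generalize h : (number - predict).natAbs = k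
  induction k generalizing predict count with
  | zero =>
    have : number = predict := by omega
    rw [gameLoopA]
    simp [this]
  | succ n ih =>
    rw [gameLoopA]
    split_ifs with h1 h2
    · omega
    · rw [ih (predict + 1) (count + 1) (by omega)]
      have : |number - predict| = |number - (predict + 1)| + 1 := by
        rw [abs_of_pos (by omega), abs_of_nonneg (by omega)]; ring
      omega
    · rw [ih (predict - 1) (count + 1) (by omega)]
      have : |number - predict| = |number - (predict - 1)| + 1 := by
        rw [abs_of_neg (by omega), abs_of_nonpos (by omega)]; ring
      omega

-- ===== VERDICT (by name: the statement is the Claim_ definition above) =====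
theorem game_core_v3_spec : Claim_equal_game_core_v3 := by
  intro number _
  unfold Spec_game_core_v3 game_core_v3 game_core_v3_alt
  simp only [List.foldl]
  rw [gameLoopA_eq]
  split_ifs <;> norm_num <;> omega
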